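-- pv_equiv track=rewrite | github.com/eggplantgf/CodingTestStudy | week4/week4_13.py | solution
-- ===== SOURCE A (Python) =====
-- def solution(chicken):
--     total_chicken = chicken
--     coupons = chicken
--
--     while coupons >= 10:
--         new_chicken = coupons // 10
--         total_chicken += new_chicken
--         coupons = coupons % 10 + new_chicken
--
--     return total_chicken //10
-- ===== SOURCE B (Python) =====
-- def solution(chicken):
--     # closed form: each exchange of 10 coupons yields 1 chicken + 1 coupon (net 9),
--     # so bonus chickens = (chicken - 1) // 9 for positive input, 0 otherwise
--     return (chicken + max(chicken - 1, 0) // 9) // 10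
-- ===== Notes on version B (the rewrite author's own statement) =====
-- stated objective: simpler
-- what changed: Replaced the while-loop coupon-exchange simulation with a direct closed-form formula: total = (chicken + max(chicken-1,0)//9) // 10.
import Mathlib
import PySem

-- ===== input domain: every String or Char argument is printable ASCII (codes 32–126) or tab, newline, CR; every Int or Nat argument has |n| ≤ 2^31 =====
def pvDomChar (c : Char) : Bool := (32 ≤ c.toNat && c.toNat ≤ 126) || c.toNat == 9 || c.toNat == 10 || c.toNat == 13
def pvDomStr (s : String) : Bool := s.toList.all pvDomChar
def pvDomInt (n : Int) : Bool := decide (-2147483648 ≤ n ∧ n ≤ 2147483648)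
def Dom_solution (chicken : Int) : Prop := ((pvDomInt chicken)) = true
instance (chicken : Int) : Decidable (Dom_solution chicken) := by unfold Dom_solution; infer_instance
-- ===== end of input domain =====

-- B replaces A's while-loop simulation with a direct closed-form formula (objective: simpler).

-- ===== PORT A =====
-- the while-loop: state (total_chicken, coupons)
def solutionLoop (total coupons : Int) : Int :=
  if _h : 10 ≤ coupons then
    let new_chicken := PySem.Int.floordiv coupons 10
    solutionLoop (total + new_chicken) (PySem.Int.mod coupons 10 + new_chicken)
  else total
termination_by coupons.toNat
decreasing_by
  rw [PySem.Int.floordiv_eq_ediv_of_pos (by omega), PySem.Int.mod_eq_emod_of_pos (by omega)]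
  omega

def solution (chicken : Int) : Int :=
  PySem.Int.floordiv (solutionLoop chicken chicken) 10

-- ===== PORT B =====
def solution_alt (chicken : Int) : Int :=
  PySem.Int.floordiv (chicken + PySem.Int.floordiv (max (chicken - 1) 0) 9) 10

-- ===== PRECONDITION & SPEC =====
def Spec_solution (chicken : Int) (out : Int) : Prop := out = solution_alt chicken
instance (chicken : Int) (out : Int) : Decidable (Spec_solution chicken out) := by unfold Spec_solution; infer_instance

-- ===== CLAIM (what is proved, stated in full; the proofs are below) =====
def Claim_equal_solution : Prop := ∀ (chicken : Int), Dom_solution chicken → Spec_solution chicken (solution chicken)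

-- ===== LEMMAS AND PROOFS =====

-- closed form for the loop: it adds (coupons-1)//9 bonus chickens when an exchange happens
theorem solutionLoop_eq (coupons total : Int) :
    solutionLoop total coupons =
      total + (if 10 ≤ coupons then (coupons - 1) / 9 else 0) := by
  by_cases h : 10 ≤ coupons
  · have hlt : (PySem.Int.mod coupons 10 + PySem.Int.floordiv coupons 10).toNat < coupons.toNat := by
      rw [PySem.Int.floordiv_eq_ediv_of_pos (by omega), PySem.Int.mod_eq_emod_of_pos (by omega)]
      omega
    rw [solutionLoop, dif_pos h, if_pos h,
      solutionLoop_eq (PySem.Int.mod coupons 10 + PySem.Int.floordiv coupons 10)]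
    rw [PySem.Int.floordiv_eq_ediv_of_pos (by omega), PySem.Int.mod_eq_emod_of_pos (by omega)]
    split_ifs <;> omega
  · rw [solutionLoop, dif_neg h, if_neg h]; omega
termination_by coupons.toNat
decreasing_by exact hlt

-- ===== VERDICT (by name: the statement is the Claim_ definition above) =====
theorem solution_spec : Claim_equal_solution := by
  intro chicken _
  show solution chicken = solution_alt chicken
  unfold solution solution_alt
  rw [solutionLoop_eq]
  by_cases h : 10 ≤ chicken
  · have hm : max (chicken - 1) 0 = chicken - 1 := by omega
    rw [if_pos h, hm, PySem.Int.floordiv_eq_ediv_of_pos (a := chicken - 1) (by omega)]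
  · rw [if_neg h]
    have h9 : PySem.Int.floordiv (max (chicken - 1) 0) 9 = 0 := by
      rw [PySem.Int.floordiv_eq_ediv_of_pos (by omega)]; omega
    rw [h9]
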